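-- pv_equiv track=rewrite | github.com/hyerim0414/Algorithm | Programmers_괄호변환.py | solution
-- ===== SOURCE A (Python) =====
-- def correct(s):
--     answer = True
--     stack=[]
--     for char in s:
--         if char == "(":
--             stack.append(char)
--         elif stack == [] :
--             return False
--         else:
--             stack.pop()
--     return stack ==[] #비어있으면 모두 짝 완성, 비어있지 않으면 완성되지 않은 괄호 존재
--
-- def solution(p):
--
--     if(p==''):
--         return ''
--     current=p
--     u=p
--     v=''
--     for i in range(2,len(current),2):
--         if(current[:i].count('(')==current[:i].count(')')):
--             u,v=current[:i],current[i:]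
--             break
--     if(correct(u)==False):
--         u=u[1:-1].replace("(",".").replace(")","(").replace(".",")")
--         answer="("+solution(v)+")"+u
--     else:
--         answer=u+solution(v)
--     return answer
-- ===== SOURCE B (Python) =====
-- def solution(p):
--     # One-pass split with a running balance (and simultaneous correctness check),
--     # iterative with prefix/suffix accumulators instead of recursion.
--     pre = []
--     suf = ""
--     cur = p
--     while cur:
--         n = len(cur)
--         bal = 0          # '(' count minus ')' count of the scanned prefix
--         depth = 0        # correctness counter: '(' pushes, any other char pops
--         ok = True        # False once a pop on empty happened
--         split = n
--         for i, ch in enumerate(cur):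
--             if ch == '(':
--                 bal += 1
--                 depth += 1
--             else:
--                 if ch == ')':
--                     bal -= 1
--                 if depth == 0:
--                     ok = False
--                 else:
--                     depth -= 1
--             j = i + 1
--             if j % 2 == 0 and j >= 2 and j < n and bal == 0:
--                 split = j
--                 break
--         u, v = cur[:split], cur[split:]
--         if ok and depth == 0:
--             pre.append(u)
--         else:
--             pre.append("(")
--             suf = ")" + "".join(
--                 ")" if ch == "(" else "(" if ch == ")" else ch for ch in u[1:-1]
--             ) + suf
--         cur = v
--     return "".join(pre) + suf
-- ===== Notes on version B (the rewrite author's own statement) =====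
-- stated objective: faster
-- what changed: B finds the split point with a one-pass running balance that simultaneously checks correctness (A rescans every even prefix with .count and runs a separate stack pass), iterates with prefix/suffix accumulators instead of recursion, and flips brackets with a direct per-character swap instead of A's three-pass replace via a '.' sentinel; Pre_ excludes strings containing '.', on which A's sentinel-based replace turns pre-existing '.' characters into closing brackets when a failed segment is flipped.
-- outside the precondition, e.g. on solution('(a.b'): A returns '()a)', B returns '()a.'; on solution('.'): A returns '()', B returns '()'
import Mathlib
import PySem

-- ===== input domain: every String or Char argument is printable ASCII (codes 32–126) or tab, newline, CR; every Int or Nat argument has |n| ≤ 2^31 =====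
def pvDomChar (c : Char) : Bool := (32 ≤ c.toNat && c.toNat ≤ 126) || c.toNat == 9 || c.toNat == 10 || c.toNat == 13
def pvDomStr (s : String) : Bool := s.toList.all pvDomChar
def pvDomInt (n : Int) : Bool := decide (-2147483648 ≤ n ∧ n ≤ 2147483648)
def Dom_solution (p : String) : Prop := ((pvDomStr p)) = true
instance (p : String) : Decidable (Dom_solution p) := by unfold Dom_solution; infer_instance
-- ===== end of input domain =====

-- B replaces A's quadratic prefix-recount split search by a one-pass running-balance scan
-- (with the correctness check folded into the same pass), A's recursion by an iterative
-- prefix/suffix-accumulator loop, and A's '.'-sentinel replace chain by a direct bracket swap.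

-- ===== PORT A =====
-- helper `correct` of A: '(' is pushed, anything else pops; False on a pop of the empty stack
def pvCorrectGo : List Char → List Char → Bool
  | [], stack => stack == []
  | ch :: rest, stack =>
    if ch == '(' then pvCorrectGo rest (ch :: stack)
    else match stack with
      | [] => false
      | _ :: stack' => pvCorrectGo rest stack'

def pvCorrect (s : List Char) : Bool := pvCorrectGo s []

def pvSplitA (s : List Char) : List Char × List Char :=
  match (PySem.List.pyRange 2 (s.length : Int) 2).find?
      (fun i => PySem.Chars.count (PySem.List.slice s none (some i)) ['('] ==
                PySem.Chars.count (PySem.List.slice s none (some i)) [')']) with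
  | some i => (PySem.List.slice s none (some i), PySem.List.slice s (some i) none)
  | none => (s, [])

lemma pvSplitA_snd_lt (s : List Char) (hs : s ≠ []) : (pvSplitA s).2.length < s.length := by
  unfold pvSplitA
  rcases hfind : (PySem.List.pyRange 2 (s.length : Int) 2).find?
      (fun i => PySem.Chars.count (PySem.List.slice s none (some i)) ['('] ==
                PySem.Chars.count (PySem.List.slice s none (some i)) [')']) with _ | i
  · simp [List.length_pos_iff, hs]
  · simp only []
    have hmem := List.mem_of_find?_eq_some hfind
    rw [PySem.List.mem_pyRange_iff_of_pos (by norm_num)] at hmem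
    obtain ⟨h2, hlt, -⟩ := hmem
    rw [PySem.List.slice_from s (by omega)]
    simp only [List.length_drop]
    omega

def solA (s : List Char) : List Char :=
  if hs : s = [] then []
  else
    let uv := pvSplitA s
    if pvCorrect uv.1 == false then
      ['('] ++ solA uv.2 ++ [')'] ++
        PySem.Chars.replace (PySem.Chars.replace (PySem.Chars.replace
          (PySem.List.slice uv.1 (some 1) (some (-1))) ['('] ['.']) [')'] ['(']) ['.'] [')']
    else uv.1 ++ solA uv.2
termination_by s.length
decreasing_by all_goals exact pvSplitA_snd_lt s hs

def solution (p : String) : String := String.ofList (solA p.toList)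

-- ===== PORT B =====
def pvFlip (ch : Char) : Char := if ch == '(' then ')' else if ch == ')' then '(' else ch

-- the inner for-loop of B: one pass over `cur` maintaining the running balance `bal` and
-- the correctness state (`depth`, `ok`); returns (split point, correct(u))
def pvScan (n : Nat) : List Char → Nat → Int → Int → Bool → Nat × Bool
  | [], _i, depthBal, depth, ok =>
      let _ := depthBal
      (n, ok && (depth == 0))
  | ch :: rest, i, bal, depth, ok =>
    let bal' := if ch == '(' then bal + 1 else if ch == ')' then bal - 1 else bal
    let depth' := if ch == '(' then depth + 1 else if depth == 0 then depth else depth - 1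
    let ok' := if ch == '(' then ok else if depth == 0 then false else ok
    if (i + 1) % 2 = 0 ∧ 2 ≤ i + 1 ∧ i + 1 < n ∧ bal' = 0 then (i + 1, ok' && (depth' == 0))
    else pvScan n rest (i + 1) bal' depth' ok'

lemma pvScan_fst_pos (l : List Char) (n i : Nat) (b d : Int) (o : Bool) (hn : 0 < n) :
    0 < (pvScan n l i b d o).1 := by
  induction l generalizing i b d o with
  | nil => simpa [pvScan] using hn
  | cons ch rest ih =>
    simp only [pvScan]
    split_ifs <;> first | simp | exact ih _ _ _ _

-- the while-loop of B with its accumulators `pre` and `suf`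
def pvSolBGo : List Char → List Char → List Char → List Char
  | [], pre, suf => pre ++ suf
  | ch :: rest, pre, suf =>
    let sc := pvScan (ch :: rest).length (ch :: rest) 0 0 0 true
    let u := (ch :: rest).take sc.1
    let v := (ch :: rest).drop sc.1
    if sc.2 then pvSolBGo v (pre ++ u) suf
    else pvSolBGo v (pre ++ ['('])
      (')' :: (PySem.List.slice u (some 1) (some (-1))).map pvFlip ++ suf)
termination_by cur _ _ => cur.length
decreasing_by all_goals
  (simp only [List.length_drop]
   have h := pvScan_fst_pos (ch :: rest) (ch :: rest).length 0 0 0 true (by simp)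
   simp only [List.length_cons] at h ⊢
   omega)

def solution_alt (p : String) : String := String.ofList (pvSolBGo p.toList [] [])

-- ===== PRECONDITION & SPEC =====
-- Pre_ excludes strings containing '.', on which A's three-pass replace uses '.' as a
-- sentinel and turns pre-existing '.' characters into closing brackets when a failed segment is
-- flipped; B flips brackets directly, so the two values can differ there.
def Pre_solution (p : String) : Prop := ('.' : Char) ∉ p.toList
instance (p : String) : Decidable (Pre_solution p) := by unfold Pre_solution; infer_instance

def pvWitness_solution : String := "(()))("

def Spec_solution (p : String) (out : String) : Prop := out = solution_alt p
instance (p : String) (out : String) : Decidable (Spec_solution p out) := by unfold Spec_solution; infer_instance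

-- ===== CLAIM (what is proved, stated in full; the proofs are below) =====
def Claim_equal_solution : Prop := ∀ (p : String), Dom_solution p → Pre_solution p → Spec_solution p (solution p)

-- ===== LEMMAS AND PROOFS =====

def pvBal (l : List Char) : Int := (l.count '(' : Int) - (l.count ')' : Int)

def pvStep (s : Int × Bool) (ch : Char) : Int × Bool :=
  if ch == '(' then (s.1 + 1, s.2) else if s.1 == 0 then (s.1, false) else (s.1 - 1, s.2)

def pvCState (l : List Char) : Int × Bool := l.foldl pvStep (0, true)

def pvGood (l : List Char) : Bool := (pvCState l).2 && ((pvCState l).1 == 0)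

lemma pvBal_append_singleton (w : List Char) (ch : Char) :
    pvBal (w ++ [ch]) = pvBal w + (if ch == '(' then 1 else if ch == ')' then - 1 else 0) := by
  simp only [pvBal, List.count_append, List.count_singleton]
  by_cases h1 : ch = '(' <;> by_cases h2 : ch = ')' <;> simp_all <;> push_cast <;> ring

lemma pvCState_append_singleton (w : List Char) (ch : Char) :
    pvCState (w ++ [ch]) = pvStep (pvCState w) ch := by
  simp [pvCState, List.foldl_append]

lemma pvStep_false_stick (l : List Char) (d : Int) :
    (l.foldl pvStep (d, false)).2 = false := by
  induction l generalizing d with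
  | nil => rfl
  | cons ch rest ih =>
    simp only [List.foldl_cons, pvStep]
    split_ifs <;> exact ih _

lemma pvCorrectGo_eq (l : List Char) (st : List Char) :
    pvCorrectGo l st =
      ((l.foldl pvStep ((st.length : Int), true)).2 &&
       ((l.foldl pvStep ((st.length : Int), true)).1 == 0)) := by
  induction l generalizing st with
  | nil => cases st <;> simp [pvCorrectGo] <;> omega
  | cons ch rest ih =>
    simp only [pvCorrectGo, List.foldl_cons]
    by_cases hc : ch == '('
    · rw [if_pos hc]
      have : pvStep ((st.length : Int), true) ch = (((ch :: st).length : Int), true) := by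
        simp [pvStep, hc]
      rw [this]; exact ih (ch :: st)
    · rw [if_neg hc]
      cases st with
      | nil =>
        have : pvStep ((([] : List Char).length : Int), true) ch = (0, false) := by
          simp [pvStep, hc]
        rw [this, pvStep_false_stick]
        simp
      | cons x st' =>
        have : pvStep (((x :: st').length : Int), true) ch = ((st'.length : Int), true) := by
          simp only [pvStep, hc, List.length_cons, if_false]
          have : ((st'.length : Int) + 1 == 0) = false := by simp; omega
          simp [this]
        rw [this]
        exact ih st'

lemma pvCorrect_eq_pvGood (l : List Char) : pvCorrect l = pvGood l := by
  simpa using pvCorrectGo_eq l []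

-- str.count with a single-character pattern is List.count

-- A's correct(s) equals the folded correctness state of B's scan
lemma pvCountGo_singleton (c : Char) (l : List Char) : ∀ (fuel acc : Nat), l.length ≤ fuel →
    PySem.Chars.count.go [c] fuel l acc = acc + l.count c := by
  induction l with
  | nil => intro fuel acc _; cases fuel <;> simp [PySem.Chars.count.go]
  | cons h t ih =>
    intro fuel acc hf
    cases fuel with
    | zero => simp at hf
    | succ f =>
      simp only [PySem.Chars.count.go]
      by_cases hch : h = c
      · have hp : [c].isPrefixOf (h :: t) = true := by simp [List.isPrefixOf, hch]
        rw [if_pos hp]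
        have hd : List.drop ([c] : List Char).length (h :: t) = t := rfl
        simp only [List.length_cons] at hf
        rw [hd, ih f (acc + 1) (by omega)]
        simp [hch, List.count_cons]
        omega
      · have hp : [c].isPrefixOf (h :: t) = false := by
          simp [List.isPrefixOf]; exact fun h' => (hch h'.symm).elim
        rw [hp]
        simp only [Bool.false_eq_true, if_false, List.length_cons] at hf ⊢
        rw [ih f acc (by omega)]
        simp [List.count_cons, hch]

lemma pvCount_singleton (l : List Char) (c : Char) : PySem.Chars.count l [c] = l.count c := by
  simpa using pvCountGo_singleton c l l.length 0 le_rfl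

-- str.replace with single-character pattern and replacement is List.map
lemma pvReplaceGo_singleton (a b : Char) (l : List Char) : ∀ (fuel : Nat) (acc : List Char),
    l.length ≤ fuel →
    PySem.Chars.replace.go [a] [b] fuel l acc =
      acc.reverse ++ l.map (fun c => if c = a then b else c) := by
  induction l with
  | nil => intro fuel acc _; cases fuel <;> simp [PySem.Chars.replace.go]
  | cons h t ih =>
    intro fuel acc hf
    cases fuel with
    | zero => simp at hf
    | succ f =>
      simp only [PySem.Chars.replace.go]
      simp only [List.length_cons] at hf
      by_cases hch : h = a
      · have hp : [a].isPrefixOf (h :: t) = true := by simp [List.isPrefixOf, hch]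
        rw [if_pos hp]
        have hd : List.drop ([a] : List Char).length (h :: t) = t := rfl
        rw [hd, ih f _ (by omega)]
        simp [hch]
      · have hp : [a].isPrefixOf (h :: t) = false := by
          simp [List.isPrefixOf]; exact fun h' => (hch h'.symm).elim
        rw [hp]
        simp only [Bool.false_eq_true, if_false]
        rw [ih f _ (by omega)]
        simp [hch]

lemma pvReplace_singleton (l : List Char) (a b : Char) :
    PySem.Chars.replace l [a] [b] = l.map (fun c => if c = a then b else c) := by
  simpa [PySem.Chars.replace] using pvReplaceGo_singleton a b l l.length [] le_rfl

-- str.replace with single-character pattern and replacement is List.map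
lemma pvReplaceChain_eq_map (l : List Char) (hdot : ('.' : Char) ∉ l) :
    PySem.Chars.replace (PySem.Chars.replace (PySem.Chars.replace l ['('] ['.']) [')'] ['(']) ['.'] [')']
      = l.map pvFlip := by
  simp only [pvReplace_singleton, List.map_map]
  refine List.map_congr_left ?_
  intro c hc
  have hcd : c ≠ '.' := fun h => hdot (h ▸ hc)
  by_cases h1 : c = '(' <;> by_cases h2 : c = ')' <;> simp [Function.comp, pvFlip, h1, h2, hcd]

def pvFS (s : List Char) (j : Nat) : Nat :=
  if _h : j < s.length then
    if (j + 1) % 2 = 0 ∧ 2 ≤ j + 1 ∧ j + 1 < s.length ∧ pvBal (s.take (j + 1)) = 0 then j + 1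
    else pvFS s (j + 1)
  else s.length
termination_by s.length - j

lemma pvFS_pos (s : List Char) (j : Nat) (hs : 0 < s.length) : 0 < pvFS s j := by
  fun_induction pvFS s j with
  | case1 j h hc => omega
  | case2 j h hc ih => exact ih
  | case3 j h => omega


lemma pvFS_min (s : List Char) (j : Nat) : ∀ m, j < m → m < pvFS s j →
    ¬ (m % 2 = 0 ∧ 2 ≤ m ∧ m < s.length ∧ pvBal (s.take m) = 0) := by
  fun_induction pvFS s j with
  | case1 j h hc => intro m h1 h2; omega
  | case2 j h hc ih =>
    intro m h1 h2
    rcases Nat.lt_or_ge (j + 1) m with hm | hm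
    · exact ih m hm h2
    · have : m = j + 1 := by omega
      subst this; exact hc
  | case3 j h => intro m h1 h2; omega

lemma pvFS_hit (s : List Char) (j : Nat) : pvFS s j = s.length ∨
    ((pvFS s j) % 2 = 0 ∧ 2 ≤ pvFS s j ∧ pvFS s j < s.length ∧ pvBal (s.take (pvFS s j)) = 0) := by
  fun_induction pvFS s j with
  | case1 j h hc => right; exact hc
  | case2 j h hc ih => exact ih
  | case3 j h => left; rfl

lemma pvTake_append_mid (w rest : List Char) (ch : Char) :
    (w ++ ch :: rest).take (w.length + 1) = w ++ [ch] := by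
  rw [show w ++ ch :: rest = (w ++ [ch]) ++ rest by simp]
  exact List.take_left' (by simp)

lemma pvStep_eq (d : Int) (o : Bool) (ch : Char) :
    pvStep (d, o) ch =
      ((if ch == '(' then d + 1 else if d == 0 then d else d - 1),
       (if ch == '(' then o else if d == 0 then false else o)) := by
  simp only [pvStep]
  split_ifs <;> rfl

lemma pvScan_spec : ∀ (rest w : List Char),
    pvScan (w ++ rest).length rest w.length (pvBal w) (pvCState w).1 (pvCState w).2
      = (pvFS (w ++ rest) w.length, pvGood ((w ++ rest).take (pvFS (w ++ rest) w.length))) := by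
  intro rest
  induction rest with
  | nil =>
    intro w
    have h1 : pvFS w w.length = w.length := by rw [pvFS]; simp
    simp [pvScan, pvGood, pvCState, h1]
  | cons ch rest ih =>
    intro w
    have htake : (w ++ ch :: rest).take (w.length + 1) = w ++ [ch] := pvTake_append_mid w rest ch
    have hbal : (if ch == '(' then pvBal w + 1 else if ch == ')' then pvBal w - 1 else pvBal w)
        = pvBal (w ++ [ch]) := by
      rw [pvBal_append_singleton]
      split_ifs <;> ring
    have hcs : pvCState (w ++ [ch]) =
        ((if ch == '(' then (pvCState w).1 + 1 else if (pvCState w).1 == 0 then (pvCState w).1 else (pvCState w).1 - 1),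
         (if ch == '(' then (pvCState w).2 else if (pvCState w).1 == 0 then false else (pvCState w).2)) := by
      rw [pvCState_append_singleton]
      rw [show pvCState w = ((pvCState w).1, (pvCState w).2) from rfl]
      exact pvStep_eq _ _ _
    have hd : (pvCState (w ++ [ch])).1 = (if ch == '(' then (pvCState w).1 + 1 else if (pvCState w).1 == 0 then (pvCState w).1 else (pvCState w).1 - 1) := by rw [hcs]
    have ho : (pvCState (w ++ [ch])).2 = (if ch == '(' then (pvCState w).2 else if (pvCState w).1 == 0 then false else (pvCState w).2) := by rw [hcs]
    simp only [pvScan]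
    rw [hbal]
    rw [pvFS]
    rw [dif_pos (by simp)]
    rw [htake]
    by_cases hcond : (w.length + 1) % 2 = 0 ∧ 2 ≤ w.length + 1 ∧ w.length + 1 < (w ++ ch :: rest).length ∧ pvBal (w ++ [ch]) = 0
    · rw [if_pos hcond, if_pos hcond]
      have hg : pvGood (w ++ [ch]) =
          ((if ch == '(' then (pvCState w).2 else if (pvCState w).1 == 0 then false else (pvCState w).2) &&
           ((if ch == '(' then (pvCState w).1 + 1 else if (pvCState w).1 == 0 then (pvCState w).1 else (pvCState w).1 - 1) == 0)) := by
        simp [pvGood, hcs]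
      rw [htake, hg]
    · rw [if_neg hcond, if_neg hcond]
      rw [← hd, ← ho]
      have IH2 := ih (w ++ [ch])
      simp only [List.append_assoc, List.singleton_append, List.length_append,
        List.length_singleton] at IH2
      rw [show (w ++ ch :: rest).length = w.length + (ch :: rest).length from by simp]
      exact IH2

lemma pvFind?_range_eq_some (p : Nat → Bool) (n t : Nat) (ht : t < n) (hp : p t = true)
    (hmin : ∀ k, k < t → p k = false) : (List.range n).find? p = some t := by
  induction n with
  | zero => omega
  | succ n ih =>
    rw [List.range_succ, List.find?_append]
    rcases Nat.lt_or_ge t n with h | h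
    · rw [ih h]; rfl
    · have ht' : t = n := by omega
      subst ht'
      have : (List.range t).find? p = none := by
        rw [List.find?_eq_none]
        intro x hx
        simp only [List.mem_range] at hx
        simp [hmin x hx]
      rw [this]
      simp [hp]

-- the count-equality test of A's loop, at a nonnegative index, is "balance zero"
lemma pvPred_iff (s : List Char) (m : Nat) :
    ((PySem.Chars.count (PySem.List.slice s none (some (m : Int))) ['('] ==
      PySem.Chars.count (PySem.List.slice s none (some (m : Int))) [')']) = true)
      ↔ pvBal (s.take m) = 0 := by
  rw [PySem.List.slice_to s (by positivity)]
  simp only [pvCount_singleton, Int.toNat_natCast, beq_iff_eq, pvBal]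
  omega

lemma pvSplitA_eq (s : List Char) (hs : s ≠ []) :
    pvSplitA s = (s.take (pvFS s 0), s.drop (pvFS s 0)) := by
  have hK := pvFS_hit s 0
  rcases hK with hK | ⟨hKe, hK2, hKlt, hKbal⟩
  · -- no admissible split point: the find? returns none
    have hnone : (PySem.List.pyRange 2 (s.length : Int) 2).find?
        (fun i => PySem.Chars.count (PySem.List.slice s none (some i)) ['('] ==
                  PySem.Chars.count (PySem.List.slice s none (some i)) [')']) = none := by
      rw [List.find?_eq_none]
      intro x hx
      rw [PySem.List.mem_pyRange_iff_of_pos (by norm_num)] at hx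
      obtain ⟨hx2, hxlt, hxdvd⟩ := hx
      obtain ⟨k, hk⟩ := hxdvd
      have hxm : x = ((x.toNat : Nat) : Int) := by omega
      rw [hxm]
      simp only [Bool.not_eq_true]
      rw [← Bool.not_eq_true, pvPred_iff]
      exact fun hbal => pvFS_min s 0 x.toNat (by omega) (by omega)
        ⟨by omega, by omega, by omega, hbal⟩
    unfold pvSplitA
    rw [hnone, hK]
    simp
  · -- first admissible split point K = pvFS s 0: the find? returns some K
    set K := pvFS s 0 with hKdef
    have h2n : (2 : Int) < (s.length : Int) := by exact_mod_cast by omega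
    have hsome : (PySem.List.pyRange 2 (s.length : Int) 2).find?
        (fun i => PySem.Chars.count (PySem.List.slice s none (some i)) ['('] ==
                  PySem.Chars.count (PySem.List.slice s none (some i)) [')']) = some (K : Int) := by
      rw [PySem.List.pyRange_of_pos 2 (s.length : Int) (by norm_num)]
      rw [List.find?_map]
      set cnt := (if (2:Int) < (s.length : Int) then (((s.length : Int) - 2 + 2 - 1) / 2).toNat else 0) with hcnt
      have hcnt' : cnt = (((s.length : Int) - 1) / 2).toNat := by
        rw [hcnt, if_pos h2n]; norm_num
      set t := (K - 2) / 2 with ht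
      have hKt : K = 2 + 2 * t := by omega
      have htcnt : t < cnt := by
        rw [hcnt']
        omega
      rw [pvFind?_range_eq_some _ cnt t htcnt]
      · simp only [Option.map_some]
        congr 1
        push_cast
        omega
      · -- the predicate holds at t
        have : ((2 : Int) + 2 * (t : Int)) = ((K : Nat) : Int) := by push_cast; omega
        simp only [Function.comp, this]
        rw [pvPred_iff]
        exact hKbal
      · -- and fails below t
        intro k hk
        have : ((2 : Int) + 2 * (k : Int)) = (((2 + 2 * k : Nat) : Nat) : Int) := by push_cast; ring
        simp only [Function.comp, this]
        rw [← Bool.not_eq_true, pvPred_iff]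
        exact fun hbal => pvFS_min s 0 (2 + 2 * k) (by omega) (by omega)
          ⟨by omega, by omega, by omega, hbal⟩
    unfold pvSplitA
    rw [hsome]
    simp only []
    rw [PySem.List.slice_to s (by positivity), PySem.List.slice_from s (by positivity)]
    simp

lemma pvSolBGo_eq (N : Nat) : ∀ (cur : List Char), cur.length ≤ N → ∀ (pre suf : List Char),
    ('.' : Char) ∉ cur → pvSolBGo cur pre suf = pre ++ solA cur ++ suf := by
  induction N with
  | zero =>
    intro cur hle pre suf _
    have : cur = [] := List.eq_nil_of_length_eq_zero (by omega)
    subst this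
    rw [pvSolBGo, solA]
    simp
  | succ N ih =>
    intro cur hle pre suf hdot
    match cur with
    | [] =>
      rw [pvSolBGo, solA]
      simp
    | ch :: rest =>
      set K := pvFS (ch :: rest) 0 with hKdef
      have hscan : pvScan (ch :: rest).length (ch :: rest) 0 0 0 true
          = (K, pvGood ((ch :: rest).take K)) := by
        have h := pvScan_spec (ch :: rest) []
        simpa [pvBal, pvCState] using h
      have hKpos : 0 < K := pvFS_pos (ch :: rest) 0 (by simp)
      have hsplit := pvSplitA_eq (ch :: rest) (List.cons_ne_nil ch rest)
      have hdrople : ((ch :: rest).drop K).length ≤ N := by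
        simp only [List.length_drop, List.length_cons] at *
        omega
      have hdotdrop : ('.' : Char) ∉ (ch :: rest).drop K :=
        fun h => hdot (List.mem_of_mem_drop h)
      have hcorr : pvCorrect ((ch :: rest).take K) = pvGood ((ch :: rest).take K) :=
        pvCorrect_eq_pvGood _
      rw [← hKdef] at hsplit
      rw [pvSolBGo]
      simp only [hscan]
      rw [solA, dif_neg (List.cons_ne_nil ch rest)]
      simp only [hsplit]
      rw [hcorr]
      cases hgood : pvGood ((ch :: rest).take K) with
      | true =>
        norm_num
        rw [ih _ hdrople (pre ++ (ch :: rest).take K) suf hdotdrop]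
        simp [List.append_assoc]
      | false =>
        norm_num
        rw [ih _ hdrople (pre ++ ['(']) _ hdotdrop]
        have hdotu : ('.' : Char) ∉ PySem.List.slice ((ch :: rest).take K) (some 1) (some (-1)) :=
          fun h => hdot (List.mem_of_mem_take (PySem.List.mem_of_mem_slice _ _ _ h))
        rw [pvReplaceChain_eq_map _ hdotu]
        simp [List.append_assoc]

-- ===== VERDICT (by name: the statement is the Claim_ definition above) =====
theorem solution_spec : Claim_equal_solution := by
  intro p _hdom hpre
  unfold Spec_solution solution solution_alt
  have h := pvSolBGo_eq p.toList.length p.toList le_rfl [] [] hpre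
  simp only [List.nil_append, List.append_nil] at h
  rw [h]
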